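-- pv_equiv track=rewrite | github.com/ktyldum/Julekalender | day8/day8.py | lookout
-- ===== SOURCE A (Python) =====
-- def lookout(a):
--     result = list(range(len(a)))[::-1]
--     for x in range(len(result)):
--         for i in range(1,result[x]):
--             if a[x+i]>=a[x]:
--                 result[x]=i
--                 break
--
--     return result
-- ===== SOURCE B (Python) =====
-- def lookout(a):
--     # Monotonic stack: next index j in [x+1, n-2] with a[j] >= a[x]; default n-1-x.
--     n = len(a)
--     res = [0] * n
--     stack = []
--     for x in range(n - 2, -1, -1):
--         ax = a[x]
--         while stack and a[stack[-1]] < ax: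
--             stack.pop()
--         res[x] = stack[-1] - x if stack else n - 1 - x
--         stack.append(x)
--     return res
-- ===== Notes on version B (the rewrite author's own statement) =====
-- stated objective: faster
-- what changed: Replaces the per-position forward rescan with a single right-to-left pass maintaining a monotonic stack of candidate indices, giving next->= distances in linear time.
import Mathlib
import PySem

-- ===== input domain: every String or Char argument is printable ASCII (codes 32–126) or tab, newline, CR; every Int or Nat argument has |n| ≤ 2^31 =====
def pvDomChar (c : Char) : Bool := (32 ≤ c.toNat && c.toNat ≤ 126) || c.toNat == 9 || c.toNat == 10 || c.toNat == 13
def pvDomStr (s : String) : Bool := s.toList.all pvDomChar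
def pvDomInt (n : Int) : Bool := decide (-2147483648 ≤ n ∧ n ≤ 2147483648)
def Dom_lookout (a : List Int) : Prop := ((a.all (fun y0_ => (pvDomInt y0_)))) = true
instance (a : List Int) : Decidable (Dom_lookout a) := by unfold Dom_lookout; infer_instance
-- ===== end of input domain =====

-- ===== PORT A =====
-- B is faster: one right-to-left monotonic-stack pass instead of a forward rescan per position.
-- Inner loop of A: for i in range(i0, b): if a[x+i] >= a[x]: result[x] = i; break.
-- Returns the first matching offset, or none (result[x] left unchanged).
-- a[x] / a[x+i] are always in range here, so List.getD is exact.
def scanA (a : List Int) (x i : Nat) (b : Int) : Option Nat :=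
  if h : (i : Int) < b then
    if a.getD x 0 ≤ a.getD (x + i) 0 then some i else scanA a x (i + 1) b
  else none
termination_by (b - i).toNat
decreasing_by omega

def lookout (a : List Int) : List Int :=
  let n := a.length
  -- result = list(range(len(a)))[::-1]
  let init := ((List.range n).map (fun k => Int.ofNat k)).reverse
  (List.range n).foldl (fun res x =>
    match scanA a x 1 (res.getD x 0) with
    | some i => res.set x (i : Int)
    | none => res) init

-- ===== PORT B =====
-- while stack and a[stack[-1]] < ax: stack.pop()
def popWhile (a : List Int) (ax : Int) : List Nat → List Nat
  | [] => []
  | j :: s => if a.getD j 0 < ax then popWhile a ax s else j :: s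

def lookout_alt (a : List Int) : List Int :=
  let n := a.length
  let res := List.replicate n (0 : Int)
  -- for x in range(n-2, -1, -1)
  (((List.range (n - 1)).reverse).foldl (fun (st : List Nat × List Int) (x : Nat) =>
    let ax := a.getD x 0
    let stack := popWhile a ax st.1
    let v : Int := match stack with
      | j :: _ => (j : Int) - (x : Int)
      | [] => (n : Int) - 1 - (x : Int)
    (x :: stack, st.2.set x v)) ([], res)).2

-- ===== PRECONDITION & SPEC =====
def Spec_lookout (a : List Int) (out : List Int) : Prop := out = lookout_alt a
instance (a : List Int) (out : List Int) : Decidable (Spec_lookout a out) := by unfold Spec_lookout; infer_instance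

-- ===== CLAIM (what is proved, stated in full; the proofs are below) =====
def Claim_equal_lookout : Prop := ∀ (a : List Int), Dom_lookout a → Spec_lookout a (lookout a)

-- ===== LEMMAS AND PROOFS =====

-- the common characterisation: first j in [x+1, n-2] with a[j] >= a[x] gives j - x, else n-1-x
def specVal (a : List Int) (x : Nat) : Int :=
  match (List.range' (x + 1) (a.length - 1 - (x + 1))).find?
      (fun j => a.getD x 0 ≤ a.getD j 0) with
  | some j => (j : Int) - (x : Int)
  | none => ((a.length - 1 - x : Nat) : Int)

theorem scanA_eq (a : List Int) (x : Nat) : ∀ (c i : Nat),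
    scanA a x i ((i + c : Nat) : Int) =
      ((List.range' (x + i) c).find? (fun j => a.getD x 0 ≤ a.getD j 0)).map (fun j => j - x) := by
  intro c
  induction c with
  | zero => intro i; rw [scanA]; simp
  | succ c ih =>
    intro i
    rw [scanA]
    have h : (i : Int) < ((i + (c + 1) : Nat) : Int) := by omega
    rw [dif_pos h, List.range'_succ, List.find?_cons]
    by_cases hp : a.getD x 0 ≤ a.getD (x + i) 0
    · rw [if_pos hp]
      simp only [List.getD] at hp
      simp [hp]
    · rw [if_neg hp]
      have hcast : ((i + (c + 1) : Nat) : Int) = (((i + 1) + c : Nat) : Int) := by omega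
      rw [hcast, ih (i + 1)]
      simp only [List.getD] at hp
      simp [hp, Nat.add_assoc]

theorem getD_set_ne {l : List Int} {x y : Nat} {v : Int} (h : y ≠ x) :
    (l.set x v).getD y 0 = l.getD y 0 := by
  simp [List.getD, List.getElem?_set_ne h.symm]

theorem getD_set_self {l : List Int} {x : Nat} {v : Int} (h : x < l.length) :
    (l.set x v).getD x 0 = v := by
  simp [List.getD, h]

-- ===== A-side: the fold over range n computes specVal at each position =====
theorem A_fold (a : List Int) : ∀ (k m : Nat) (res : List Int),
    res.length = a.length → m + k = a.length →
    (∀ y, m ≤ y → y < a.length → res.getD y 0 = ((a.length - 1 - y : Nat) : Int)) →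
    ∃ L, (List.range' m k).foldl (fun res x =>
        match scanA a x 1 (res.getD x 0) with
        | some i => res.set x (i : Int)
        | none => res) res = L ∧
      L.length = a.length ∧
      (∀ y, y < m → L.getD y 0 = res.getD y 0) ∧
      (∀ y, m ≤ y → y < a.length → L.getD y 0 = specVal a y) := by
  intro k
  induction k with
  | zero =>
    intro m res hlen hmk hres
    exact ⟨res, rfl, hlen, fun y _ => rfl, fun y h1 h2 => by omega⟩
  | succ k ih =>
    intro m res hlen hmk hres
    have hm : m < a.length := by omega
    rw [List.range'_succ, List.foldl_cons]
    have hgd : res.getD m 0 = ((a.length - 1 - m : Nat) : Int) := hres m le_rfl hm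
    have hb : ((a.length - 1 - m : Nat) : Int) = ((1 + (a.length - 1 - (m + 1)) : Nat) : Int) ∨
        a.length - 1 - m = 0 := by omega
    -- the updated list after step m
    set res' := (match scanA a m 1 (res.getD m 0) with
      | some i => res.set m (i : Int)
      | none => res) with hres'
    have hlen' : res'.length = a.length := by
      rw [hres']; cases scanA a m 1 (res.getD m 0) <;> simp [hlen]
    have hmval : res'.getD m 0 = specVal a m := by
      rcases hb with hb | hb
      · rw [hres', hgd, hb, scanA_eq]
        unfold specVal
        cases hf : (List.range' (m + 1) (a.length - 1 - (m + 1))).find?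
            (fun j => a.getD m 0 ≤ a.getD j 0) with
        | none =>
          simp only [Option.map_none]
          exact hgd
        | some j =>
          have hjm : m + 1 ≤ j := by
            have := List.mem_range'_1.mp (List.mem_of_find?_eq_some hf)
            omega
          simp only [Option.map_some]
          rw [getD_set_self (by rw [hlen]; exact hm)]
          omega
      · -- empty search range: scanA returns none immediately, value stays n-1-m = 0
        have hsc : scanA a m 1 (((0 : Nat) : Int)) = none := by
          rw [scanA]
          norm_num
        rw [hres', hgd, hb, hsc]
        unfold specVal
        have h2 : a.length - 1 - (m + 1) = 0 := by omega
        rw [h2]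
        simp only [List.range'_zero, List.find?_nil]
        exact hgd
    have hother : ∀ y, m + 1 ≤ y → y < a.length →
        res'.getD y 0 = ((a.length - 1 - y : Nat) : Int) := by
      intro y h1 h2
      have hy : y ≠ m := by omega
      rw [hres']
      cases scanA a m 1 (res.getD m 0) with
      | some i => rw [getD_set_ne hy]; exact hres y (by omega) h2
      | none => exact hres y (by omega) h2
    obtain ⟨L, hL, hLlen, hLlo, hLhi⟩ := ih (m + 1) res' hlen' (by omega) hother
    refine ⟨L, hL, hLlen, ?_, ?_⟩
    · intro y hy
      rw [hLlo y (by omega)]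
      rw [hres']
      cases scanA a m 1 (res.getD m 0) with
      | some i => exact getD_set_ne (by omega)
      | none => rfl
    · intro y h1 h2
      rcases Nat.eq_or_lt_of_le h1 with rfl | h
      · rw [hLlo _ (Nat.lt_succ_self _)]
        exact hmval
      · exact hLhi y h h2

-- ===== B-side: the visible-stack function and its characterisation =====
def vis (a : List Int) (x : Nat) : List Nat :=
  if h : x < a.length - 1 then x :: popWhile a (a.getD x 0) (vis a (x + 1)) else []
termination_by a.length - 1 - x
decreasing_by omega

theorem popWhile_popWhile (a : List Int) {t t' : Int} (h : t' ≤ t) :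
    ∀ s, popWhile a t (popWhile a t' s) = popWhile a t s := by
  intro s
  induction s with
  | nil => rfl
  | cons j rest ih =>
    by_cases hj : a.getD j 0 < t'
    · have hjt : a.getD j 0 < t := by omega
      simp only [List.getD] at hj hjt
      simp [popWhile, hj, hjt, ih]
    · simp only [List.getD] at hj
      simp [popWhile, hj]

theorem vis_head (a : List Int) : ∀ (c x : Nat), a.length - 1 - x = c →
    ∀ t, (popWhile a t (vis a x)).head? =
      (List.range' x (a.length - 1 - x)).find? (fun j => t ≤ a.getD j 0) := by
  intro c
  induction c with
  | zero =>
    intro x hx t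
    rw [vis]
    have : ¬ x < a.length - 1 := by omega
    simp [this, hx, popWhile]
  | succ c ih =>
    intro x hx t
    rw [vis]
    have hlt : x < a.length - 1 := by omega
    simp only [hlt, dif_pos]
    have hrange : List.range' x (a.length - 1 - x) = x :: List.range' (x + 1) (a.length - 1 - (x + 1)) := by
      have h1 : a.length - 1 - x = (a.length - 1 - (x + 1)) + 1 := by omega
      rw [h1, List.range'_succ]
    rw [hrange, List.find?_cons]
    by_cases hp : t ≤ a.getD x 0
    · have h1 : ¬ (a.getD x 0 < t) := by omega
      simp only [List.getD] at hp h1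
      simp [popWhile, h1, hp]
    · rw [popWhile, if_pos (show a.getD x 0 < t by omega),
        popWhile_popWhile a (show a.getD x 0 ≤ t by omega)]
      rw [decide_eq_false hp]
      simpa using ih (x + 1) (by omega) t

theorem B_fold (a : List Int) : ∀ (k m : Nat), m + k ≤ a.length - 1 →
    ∀ (res : List Int), res.length = a.length →
    ∃ L, ((List.range' m k).reverse).foldl (fun (st : List Nat × List Int) (x : Nat) =>
        let ax := a.getD x 0
        let stack := popWhile a ax st.1
        let v : Int := match stack with
          | j :: _ => (j : Int) - (x : Int)
          | [] => (a.length : Int) - 1 - (x : Int)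
        (x :: stack, st.2.set x v)) (vis a (m + k), res) = (vis a m, L) ∧
      L.length = a.length ∧
      (∀ y, y < m ∨ m + k ≤ y → L.getD y 0 = res.getD y 0) ∧
      (∀ y, m ≤ y → y < m + k → L.getD y 0 = specVal a y) := by
  intro k
  induction k with
  | zero =>
    intro m hm res hlen
    exact ⟨res, rfl, hlen, fun y _ => rfl, fun y h1 h2 => by omega⟩
  | succ k ih =>
    intro m hm res hlen
    have hrange : List.range' m (k + 1) = m :: List.range' (m + 1) k := by
      rw [List.range'_succ]
    rw [hrange, List.reverse_cons, List.foldl_append]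
    obtain ⟨L₁, hL₁, hlen₁, hout₁, hin₁⟩ := ih (m + 1) (by omega) res hlen
    have hmk : m + 1 + k = m + (k + 1) := by omega
    rw [hmk] at hL₁
    rw [hL₁, List.foldl_cons, List.foldl_nil]
    have hm' : m < a.length - 1 := by omega
    have hstack : (m :: popWhile a (a.getD m 0) (vis a (m + 1))) = vis a m := by
      conv_rhs => rw [vis]
      rw [dif_pos hm']
    have hhead := vis_head a (a.length - 1 - (m + 1)) (m + 1) rfl (a.getD m 0)
    have hval : (match popWhile a (a.getD m 0) (vis a (m + 1)) with
        | j :: _ => (j : Int) - (m : Int)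
        | [] => (a.length : Int) - 1 - (m : Int)) = specVal a m := by
      unfold specVal
      cases hs : popWhile a (a.getD m 0) (vis a (m + 1)) with
      | nil =>
        rw [hs, List.head?_nil] at hhead
        rw [← hhead]
        have hcast : ((a.length - 1 - m : Nat) : Int) = (a.length : Int) - 1 - (m : Int) := by omega
        rw [hcast]
      | cons j s =>
        rw [hs] at hhead
        simp only [List.head?_cons] at hhead
        rw [← hhead]
    refine ⟨L₁.set m (specVal a m), by simp only [← hstack, ← hval], by simp [hlen₁], ?_, ?_⟩
    · intro y hy
      have hy' : y ≠ m := by omega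
      rw [getD_set_ne hy']
      exact hout₁ y (by omega)
    · intro y h1 h2
      rcases Nat.eq_or_lt_of_le h1 with h | h
      · rw [← h, getD_set_self (by rw [hlen₁]; omega)]
      · rw [getD_set_ne (by omega)]
        exact hin₁ y h (by omega)

theorem specVal_last (a : List Int) (h : 0 < a.length) :
    specVal a (a.length - 1) = 0 := by
  unfold specVal
  have h1 : a.length - 1 - (a.length - 1 + 1) = 0 := by omega
  simp [h1]

theorem lookout_eq_spec (a : List Int) :
    lookout a = (List.range a.length).map (specVal a) := by
  unfold lookout
  have hinit : ∀ y, y < a.length →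
      (((List.range a.length).map (fun k => Int.ofNat k)).reverse).getD y 0 = ((a.length - 1 - y : Nat) : Int) := by
    intro y hy
    have h1 : y < (((List.range a.length).map (fun k => Int.ofNat k)).reverse).length := by
      simpa using hy
    rw [List.getD_eq_getElem?_getD, List.getElem?_eq_getElem h1, Option.getD_some,
      List.getElem_reverse]
    simp
  obtain ⟨L, hL, hlen, _, hval⟩ := A_fold a a.length 0
    (((List.range a.length).map (fun k => Int.ofNat k)).reverse) (by simp) (by omega)
    (fun y _ hy => hinit y hy)
  rw [← List.range_eq_range'] at hL
  simp only []
  rw [hL]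
  apply List.ext_getElem (by simp [hlen])
  intro i h1 h2
  have hi : i < a.length := by simpa [hlen] using h1
  have := hval i (by omega) hi
  rw [List.getD_eq_getElem?_getD, List.getElem?_eq_getElem h1] at this
  simp only [Option.getD_some] at this
  simp [this]

theorem lookout_alt_eq_spec (a : List Int) :
    lookout_alt a = (List.range a.length).map (specVal a) := by
  unfold lookout_alt
  have hvis : vis a (0 + (a.length - 1)) = [] := by
    rw [vis]; simp
  obtain ⟨L, hL, hlen, hout, hin⟩ := B_fold a (a.length - 1) 0 (by omega)
    (List.replicate a.length 0) (by simp)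
  rw [hvis] at hL
  have hvis0 : vis a 0 = vis a 0 := rfl
  rw [← List.range_eq_range'] at hL
  dsimp only
  rw [hL]
  apply List.ext_getElem (by simp [hlen])
  intro i h1 h2
  have hi : i < a.length := by simpa [hlen] using h1
  have hv : L.getD i 0 = specVal a i := by
    by_cases hlt : i < a.length - 1
    · exact hin i (by omega) (by omega)
    · have hil : i = a.length - 1 := by omega
      rw [hout i (Or.inr (by omega))]
      rw [hil, specVal_last a (by omega)]
      simp [List.getD_eq_getElem?_getD, show a.length - 1 < a.length by omega]
  rw [List.getD_eq_getElem?_getD, List.getElem?_eq_getElem h1] at hv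
  simp only [Option.getD_some] at hv
  simp [hv]

-- ===== VERDICT (by name: the statement is the Claim_ definition above) =====
theorem lookout_spec : Claim_equal_lookout := by
  intro a _
  unfold Spec_lookout
  rw [lookout_eq_spec, lookout_alt_eq_spec]
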